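-- pv_equiv track=rewrite | github.com/nerdsane/deep-sci-fi | src/co_scientist/co_scientist.py | parse_debate_result_directions
-- ===== SOURCE A (Python) =====
-- def parse_debate_result_directions(conclusion_text: str) -> list:
--     """Parse research directions from LLM collaborative consultation conclusion."""
--     directions = []
--
--     # Look for FINAL CONSENSUS section
--     if "FINAL CONSENSUS:" in conclusion_text:
--         lines = conclusion_text.split("FINAL CONSENSUS:")[1].split('\n')
--     else:
--         lines = conclusion_text.split('\n')
--
--     current_direction = None
--
--     for line in lines:
--         line = line.strip()
--
--         # Look for direction headers
--         if line.startswith('Direction ') and ':' in line: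
--             if current_direction:
--                 directions.append(current_direction)
--
--             direction_name = line.split(':', 1)[1].strip()
--             current_direction = {
--                 "name": direction_name,
--                 "assumption": "",  # Maps to core_focus for backward compatibility
--                 "focus": ""        # Maps to research_approach for backward compatibility
--             }
--
--         elif current_direction:
--             # Support both old format (for backward compatibility) and new collaborative format
--             if line.startswith('Core Assumption:'):
--                 current_direction["assumption"] = line.split(':', 1)[1].strip()
--             elif line.startswith('Core Focus:'):
--                 current_direction["assumption"] = line.split(':', 1)[1].strip()  # Map to assumption field
--             elif line.startswith('Focus:'):
--                 current_direction["focus"] = line.split(':', 1)[1].strip()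
--             elif line.startswith('Research Approach:'):
--                 current_direction["focus"] = line.split(':', 1)[1].strip()  # Map to focus field
--
--     # Add the last direction
--     if current_direction:
--         directions.append(current_direction)
--
--     return directions
-- ===== SOURCE B (Python) =====
-- def _is_header(line):
--     return line.startswith('Direction ') and ':' in line
--
--
-- def _after_colon(line):
--     return line.split(':', 1)[1].strip()
--
--
-- def _split_groups(lines):
--     """Partition stripped lines into header-led groups (preamble dropped)."""
--     while lines and not _is_header(lines[0]):
--         lines = lines[1:]
--     if not lines:
--         return []
--     body = []
--     rest = lines[1:]
--     while rest and not _is_header(rest[0]):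
--         body.append(rest[0])
--         rest = rest[1:]
--     return [[lines[0]] + body] + _split_groups(rest)
--
--
-- def _parse_group(group):
--     assumption = focus = ""
--     for line in group[1:]:
--         if line.startswith('Core Assumption:') or line.startswith('Core Focus:'):
--             assumption = _after_colon(line)
--         elif line.startswith('Focus:') or line.startswith('Research Approach:'):
--             focus = _after_colon(line)
--     return {"name": _after_colon(group[0]), "assumption": assumption, "focus": focus}
--
--
-- def parse_debate_result_directions(conclusion_text: str) -> list:
--     """Parse research directions from LLM collaborative consultation conclusion."""
--     if "FINAL CONSENSUS:" in conclusion_text: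
--         rest = conclusion_text.split("FINAL CONSENSUS:")[1]
--     else:
--         rest = conclusion_text
--     lines = [l.strip() for l in rest.split('\n')]
--     return [_parse_group(g) for g in _split_groups(lines)]
-- ===== Notes on version B (the rewrite author's own statement) =====
-- stated objective: alternative
-- what changed: Replaces A's single stateful scan carrying a current-direction dict with a two-phase decomposition: first partition the stripped lines into header-led groups (dropping the preamble), then parse each group independently into its dict.
import Mathlib
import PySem

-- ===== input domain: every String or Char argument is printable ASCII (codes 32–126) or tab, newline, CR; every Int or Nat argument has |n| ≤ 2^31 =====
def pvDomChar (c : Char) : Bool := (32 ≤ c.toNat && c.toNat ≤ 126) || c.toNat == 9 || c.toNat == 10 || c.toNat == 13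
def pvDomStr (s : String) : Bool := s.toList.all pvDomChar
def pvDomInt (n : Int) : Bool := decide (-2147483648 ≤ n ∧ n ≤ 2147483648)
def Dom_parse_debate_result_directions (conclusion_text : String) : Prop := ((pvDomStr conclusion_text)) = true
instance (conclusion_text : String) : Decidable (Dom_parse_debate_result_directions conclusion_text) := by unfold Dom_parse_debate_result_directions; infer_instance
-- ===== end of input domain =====

-- B replaces A's single stateful scan (current-direction dict accumulator) by a two-phase
-- segment-then-parse decomposition: group stripped lines under their 'Direction …:' headers,
-- then parse each group independently (objective: alternative, same cost).


-- ===== PORT A =====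
-- A's loop body: strip the line, open a new direction on a header, else update the
-- current direction dict per field prefix (literal transliteration of A's for-loop).
def pvStepA (st : List (PySem.Dict String String) × Option (PySem.Dict String String))
    (line0 : String) : List (PySem.Dict String String) × Option (PySem.Dict String String) :=
  let line := PySem.Str.strip line0
  if PySem.Str.startswith line "Direction " && PySem.Str.isIn ":" line then
    let dirs := match st.2 with
      | some cd => st.1 ++ [cd]
      | none => st.1
    let direction_name := PySem.Str.strip (((PySem.Str.splitMax? line ":" 1).getD []).getD 1 "")
    (dirs, some (PySem.Dict.ofList [("name", direction_name), ("assumption", ""), ("focus", "")]))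
  else
    match st.2 with
    | none => st
    | some cd =>
      if PySem.Str.startswith line "Core Assumption:" then
        (st.1, some (cd.insert "assumption" (PySem.Str.strip (((PySem.Str.splitMax? line ":" 1).getD []).getD 1 ""))))
      else if PySem.Str.startswith line "Core Focus:" then
        (st.1, some (cd.insert "assumption" (PySem.Str.strip (((PySem.Str.splitMax? line ":" 1).getD []).getD 1 ""))))
      else if PySem.Str.startswith line "Focus:" then
        (st.1, some (cd.insert "focus" (PySem.Str.strip (((PySem.Str.splitMax? line ":" 1).getD []).getD 1 ""))))
      else if PySem.Str.startswith line "Research Approach:" then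
        (st.1, some (cd.insert "focus" (PySem.Str.strip (((PySem.Str.splitMax? line ":" 1).getD []).getD 1 ""))))
      else st

def parse_debate_result_directions (conclusion_text : String) : List (List (String × String)) :=
  let lines :=
    if PySem.Str.isIn "FINAL CONSENSUS:" conclusion_text then
      (PySem.Str.split? (((PySem.Str.split? conclusion_text "FINAL CONSENSUS:").getD []).getD 1 "") "\n").getD []
    else
      (PySem.Str.split? conclusion_text "\n").getD []
  let st := lines.foldl pvStepA ([], none)
  let directions := match st.2 with
    | some cd => st.1 ++ [cd]
    | none => st.1
  directions.map PySem.Dict.items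

-- ===== PORT B =====
def pvIsHeader (line : String) : Bool :=
  PySem.Str.startswith line "Direction " && PySem.Str.isIn ":" line

def pvAfterColon (line : String) : String :=
  PySem.Str.strip (((PySem.Str.splitMax? line ":" 1).getD []).getD 1 "")

-- _split_groups: drop the preamble, take the body up to the next header, recurse on the rest.
def pvSplitGroups : List String → List (List String)
  | [] => []
  | l :: ls =>
    if pvIsHeader l then
      (l :: ls.takeWhile (fun x => !pvIsHeader x)) :: pvSplitGroups (ls.dropWhile (fun x => !pvIsHeader x))
    else
      pvSplitGroups ls
termination_by ls => ls.length
decreasing_by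
  · exact Nat.lt_succ_of_le (List.length_dropWhile_le _ _)
  · exact Nat.lt_succ_self _

-- _parse_group: fold the field rules over the group's body, last match wins.
def pvFieldStep (af : String × String) (line : String) : String × String :=
  if PySem.Str.startswith line "Core Assumption:" || PySem.Str.startswith line "Core Focus:" then
    (pvAfterColon line, af.2)
  else if PySem.Str.startswith line "Focus:" || PySem.Str.startswith line "Research Approach:" then
    (af.1, pvAfterColon line)
  else af

def pvParseGroup (g : List String) : List (String × String) :=
  match g with
  | [] => []
  | h :: body =>
    let af := body.foldl pvFieldStep ("", "")
    [("name", pvAfterColon h), ("assumption", af.1), ("focus", af.2)]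

def parse_debate_result_directions_alt (conclusion_text : String) : List (List (String × String)) :=
  let rest :=
    if PySem.Str.isIn "FINAL CONSENSUS:" conclusion_text then
      ((PySem.Str.split? conclusion_text "FINAL CONSENSUS:").getD []).getD 1 ""
    else
      conclusion_text
  let lines := ((PySem.Str.split? rest "\n").getD []).map PySem.Str.strip
  (pvSplitGroups lines).map pvParseGroup

-- ===== PRECONDITION & SPEC =====
def Spec_parse_debate_result_directions (conclusion_text : String) (out : List (List (String × String))) : Prop := out = parse_debate_result_directions_alt conclusion_text
instance (conclusion_text : String) (out : List (List (String × String))) : Decidable (Spec_parse_debate_result_directions conclusion_text out) := by unfold Spec_parse_debate_result_directions; infer_instance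

-- ===== CLAIM (what is proved, stated in full; the proofs are below) =====
def Claim_equal_parse_debate_result_directions : Prop := ∀ (conclusion_text : String), Dom_parse_debate_result_directions conclusion_text → Spec_parse_debate_result_directions conclusion_text (parse_debate_result_directions conclusion_text)

-- ===== LEMMAS AND PROOFS =====

-- A's loop body on an already-stripped line (pvStepA st l = pvStepCore st (strip l) by rfl).
def pvStepCore (st : List (PySem.Dict String String) × Option (PySem.Dict String String))
    (line : String) : List (PySem.Dict String String) × Option (PySem.Dict String String) :=
  if pvIsHeader line then
    let dirs := match st.2 with
      | some cd => st.1 ++ [cd]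
      | none => st.1
    (dirs, some (PySem.Dict.ofList [("name", pvAfterColon line), ("assumption", ""), ("focus", "")]))
  else
    match st.2 with
    | none => st
    | some cd =>
      if PySem.Str.startswith line "Core Assumption:" then
        (st.1, some (cd.insert "assumption" (pvAfterColon line)))
      else if PySem.Str.startswith line "Core Focus:" then
        (st.1, some (cd.insert "assumption" (pvAfterColon line)))
      else if PySem.Str.startswith line "Focus:" then
        (st.1, some (cd.insert "focus" (pvAfterColon line)))
      else if PySem.Str.startswith line "Research Approach:" then
        (st.1, some (cd.insert "focus" (pvAfterColon line)))
      else st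

theorem pvStepA_eq_core (st : List (PySem.Dict String String) × Option (PySem.Dict String String))
    (l : String) : pvStepA st l = pvStepCore st (PySem.Str.strip l) := rfl

def pvMkD (n a f : String) : PySem.Dict String String :=
  PySem.Dict.ofList [("name", n), ("assumption", a), ("focus", f)]

def pvFinish (st : List (PySem.Dict String String) × Option (PySem.Dict String String)) :
    List (PySem.Dict String String) :=
  match st.2 with
  | some cd => st.1 ++ [cd]
  | none => st.1

theorem pvInsertA (n a f v : String) : (pvMkD n a f).insert "assumption" v = pvMkD n v f := rfl
theorem pvInsertF (n a f v : String) : (pvMkD n a f).insert "focus" v = pvMkD n a v := rfl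
theorem pvItems (n a f : String) :
    (pvMkD n a f).items = [("name", n), ("assumption", a), ("focus", f)] := rfl

theorem pvStep_header (st : List (PySem.Dict String String) × Option (PySem.Dict String String))
    (l : String) (hl : pvIsHeader l = true) :
    pvStepCore st l = (pvFinish st, some (pvMkD (pvAfterColon l) "" "")) := by
  obtain ⟨ds, c⟩ := st
  cases c <;> simp [pvStepCore, hl, pvFinish, pvMkD]

theorem pvStep_none (dirs : List (PySem.Dict String String)) (l : String)
    (hl : pvIsHeader l = false) : pvStepCore (dirs, none) l = (dirs, none) := by
  simp [pvStepCore, hl]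

theorem pvStep_some (dirs : List (PySem.Dict String String)) (n a f l : String)
    (hl : pvIsHeader l = false) :
    pvStepCore (dirs, some (pvMkD n a f)) l
      = (dirs, some (pvMkD n (pvFieldStep (a, f) l).1 (pvFieldStep (a, f) l).2)) := by
  simp only [pvStepCore, hl, Bool.false_eq_true, if_false, pvFieldStep]
  split_ifs <;> simp_all [pvInsertA, pvInsertF]

theorem pvL2 (ls : List String) : ∀ (dirs : List (PySem.Dict String String)) (n a f : String),
    (pvFinish (ls.foldl pvStepCore (dirs, some (pvMkD n a f)))).map PySem.Dict.items
      = dirs.map PySem.Dict.items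
        ++ [("name", n),
            ("assumption", ((ls.takeWhile (fun x => !pvIsHeader x)).foldl pvFieldStep (a, f)).1),
            ("focus", ((ls.takeWhile (fun x => !pvIsHeader x)).foldl pvFieldStep (a, f)).2)]
          :: (pvSplitGroups (ls.dropWhile (fun x => !pvIsHeader x))).map pvParseGroup := by
  induction ls with
  | nil => intro dirs n a f; simp [pvFinish, pvSplitGroups, pvItems]
  | cons l ls ih =>
    intro dirs n a f
    by_cases hl : pvIsHeader l = true
    · rw [List.foldl_cons, pvStep_header _ _ hl,
        show pvFinish (dirs, some (pvMkD n a f)) = dirs ++ [pvMkD n a f] from rfl, ih]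
      simp [pvSplitGroups, hl, pvParseGroup, pvItems]
    · have hl' : pvIsHeader l = false := Bool.eq_false_iff.mpr hl
      rw [List.foldl_cons, pvStep_some _ _ _ _ _ hl', ih]
      simp [hl']

theorem pvL1 (ls : List String) : ∀ (dirs : List (PySem.Dict String String)),
    (pvFinish (ls.foldl pvStepCore (dirs, none))).map PySem.Dict.items
      = dirs.map PySem.Dict.items ++ (pvSplitGroups ls).map pvParseGroup := by
  induction ls with
  | nil => intro dirs; simp [pvFinish, pvSplitGroups]
  | cons l ls ih =>
    intro dirs
    by_cases hl : pvIsHeader l = true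
    · rw [List.foldl_cons, pvStep_header _ _ hl,
        show pvFinish (dirs, none) = dirs from rfl, pvL2]
      simp [pvSplitGroups, hl, pvParseGroup]
    · have hl' : pvIsHeader l = false := Bool.eq_false_iff.mpr hl
      rw [List.foldl_cons, pvStep_none _ _ hl', ih]
      simp [pvSplitGroups, hl']

-- ===== VERDICT (by name: the statement is the Claim_ definition above) =====
theorem parse_debate_result_directions_spec : Claim_equal_parse_debate_result_directions := by
  intro t _
  unfold Spec_parse_debate_result_directions parse_debate_result_directions parse_debate_result_directions_alt
  have hfold : ∀ (init : List (PySem.Dict String String) × Option (PySem.Dict String String))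
      (lines : List String),
      List.foldl pvStepA init lines = List.foldl pvStepCore init (lines.map PySem.Str.strip) := by
    intro init lines
    rw [show pvStepA = (fun st l => pvStepCore st (PySem.Str.strip l)) from
      funext fun st => funext fun l => pvStepA_eq_core st l, List.foldl_map]
  cases PySem.Str.isIn "FINAL CONSENSUS:" t
  · simp only [Bool.false_eq_true, if_false, hfold]
    simpa [pvFinish] using pvL1 (List.map PySem.Str.strip _) []
  · simp only [if_true, hfold]
    simpa [pvFinish] using pvL1 (List.map PySem.Str.strip _) []
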